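-- pv_equiv track=rewrite | github.com/visprasadh/sr71 | tools.py | split_tasks
-- ===== SOURCE A (Python) =====
-- def split_tasks(images: list, labels: list, classes_per_task: int = 2):
--     # Parameters
--     # 1. List of images pertaining to a singular domain
--     # 2. List of labels
--     # 3. Number of classes per task
--
--     n_images = len(images)
--     n_classes = len(set(labels))
--     n_splits = n_classes // classes_per_task
--     task_images = {task: [] for task in range(n_splits)}
--     task_labels = {task: [] for task in range(n_splits)}
--     c = list(range(classes_per_task))
--     for i in range(n_splits):
--         # Labels to be included
--         l = [x + (i * classes_per_task) for x in c]
--         for j in range(n_images):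
--             if labels[j] in l:
--                 task_labels[i].append(labels[j])
--                 task_images[i].append(images[j])
--     return task_images, task_labels
-- ===== SOURCE B (Python) =====
-- def split_tasks(images: list, labels: list, classes_per_task: int = 2):
--     # Single pass over zip(images, labels): a label's task index is
--     # label // classes_per_task; items are collected into plain list buckets
--     # (no dict mutation), and the two dicts are built once at the end.
--     n_splits = len(set(labels)) // classes_per_task
--     img_buckets = [[] for _ in range(n_splits)]
--     lab_buckets = [[] for _ in range(n_splits)]
--     for img, lab in zip(images, labels):
--         t = lab // classes_per_task
--         if 0 <= t < n_splits:
--             img_buckets[t].append(img)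
--             lab_buckets[t].append(lab)
--     return ({t: img_buckets[t] for t in range(n_splits)},
--             {t: lab_buckets[t] for t in range(n_splits)})
-- ===== Notes on version B (the rewrite author's own statement) =====
-- stated objective: faster
-- what changed: Replaces A's nested loop (for each of the n_splits tasks, scan all images and test label membership in that task's class list) by a single pass over zip(images, labels) that computes each label's task index directly as label // classes_per_task and appends into indexed list buckets, building the dicts once at the end.
import Mathlib
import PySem

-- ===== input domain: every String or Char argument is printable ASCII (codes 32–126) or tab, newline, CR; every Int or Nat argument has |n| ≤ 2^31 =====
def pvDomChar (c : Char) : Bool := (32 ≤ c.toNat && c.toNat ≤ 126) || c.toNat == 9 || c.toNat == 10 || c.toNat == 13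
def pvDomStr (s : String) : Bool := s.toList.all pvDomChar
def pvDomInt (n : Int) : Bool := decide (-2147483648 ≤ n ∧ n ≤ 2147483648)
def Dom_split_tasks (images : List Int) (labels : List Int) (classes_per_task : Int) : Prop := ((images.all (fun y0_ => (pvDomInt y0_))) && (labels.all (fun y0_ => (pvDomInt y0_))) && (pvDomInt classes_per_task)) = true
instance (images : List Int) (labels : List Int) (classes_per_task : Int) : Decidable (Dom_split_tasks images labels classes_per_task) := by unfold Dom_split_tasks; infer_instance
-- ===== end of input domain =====

-- B replaces A's nested per-task membership scan by a single pass that computes each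
-- label's task index by floor division into indexed list buckets (objective: faster).

-- ===== PORT A =====
def split_tasks (images : List Int) (labels : List Int) (classes_per_task : Int) : (List (Int × List Int)) × (List (Int × List Int)) :=
  let n_images : Int := images.length
  let n_classes : Int := ((PySem.Set.ofList labels).length : Int)
  let n_splits : Int := PySem.Int.floordiv n_classes classes_per_task
  let task_images : PySem.Dict Int (List Int) :=
    (PySem.List.pyRange 0 n_splits 1).foldl (fun d task => d.insert task []) PySem.Dict.empty
  let task_labels : PySem.Dict Int (List Int) :=
    (PySem.List.pyRange 0 n_splits 1).foldl (fun d task => d.insert task []) PySem.Dict.empty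
  let c : List Int := PySem.List.pyRange 0 classes_per_task 1
  let st := (PySem.List.pyRange 0 n_splits 1).foldl (fun st i =>
    let l : List Int := c.map (fun x => x + i * classes_per_task)
    (PySem.List.pyRange 0 n_images 1).foldl (fun st j =>
      if (PySem.List.pyGetD labels j 0) ∈ l then
        (st.1.modify i [] (fun v => v ++ [PySem.List.pyGetD images j 0]),
         st.2.modify i [] (fun v => v ++ [PySem.List.pyGetD labels j 0]))
      else st) st) (task_images, task_labels)
  (st.1.items, st.2.items)

-- ===== PORT B =====
-- Source B collects into plain list buckets by computed index and builds the dicts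
-- at the end via two comprehensions over range(n_splits).
def split_tasks_alt (images : List Int) (labels : List Int) (classes_per_task : Int) : (List (Int × List Int)) × (List (Int × List Int)) :=
  let n_splits : Int := PySem.Int.floordiv ((PySem.Set.ofList labels).length : Int) classes_per_task
  let img_buckets : List (List Int) := List.replicate n_splits.toNat []
  let lab_buckets : List (List Int) := List.replicate n_splits.toNat []
  let st := (images.zip labels).foldl (fun st p =>
    let t := PySem.Int.floordiv p.2 classes_per_task
    if 0 ≤ t ∧ t < n_splits then
      (st.1.set t.toNat (st.1.getD t.toNat [] ++ [p.1]),
       st.2.set t.toNat (st.2.getD t.toNat [] ++ [p.2]))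
    else st) (img_buckets, lab_buckets)
  ((PySem.List.pyRange 0 n_splits 1).map (fun t => (t, st.1.getD t.toNat [])),
   (PySem.List.pyRange 0 n_splits 1).map (fun t => (t, st.2.getD t.toNat [])))

-- ===== PRECONDITION & SPEC =====
-- Pre_ excludes exactly the inputs where A raises: classes_per_task = 0 (ZeroDivisionError),
-- and labels shorter than images while at least one task exists (IndexError on labels[j]).
def Pre_split_tasks (images : List Int) (labels : List Int) (classes_per_task : Int) : Prop :=
  classes_per_task ≠ 0 ∧
  (images.length ≤ labels.length ∨
   PySem.Int.floordiv ((PySem.Set.ofList labels).length : Int) classes_per_task ≤ 0)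
instance (images : List Int) (labels : List Int) (classes_per_task : Int) : Decidable (Pre_split_tasks images labels classes_per_task) := by unfold Pre_split_tasks; infer_instance

def pvWitness_split_tasks : List Int × List Int × Int := ([10, 11, 12, 13], [0, 1, 2, 3], 2)

def Spec_split_tasks (images : List Int) (labels : List Int) (classes_per_task : Int) (out : (List (Int × List Int)) × (List (Int × List Int))) : Prop := out = split_tasks_alt images labels classes_per_task
instance (images : List Int) (labels : List Int) (classes_per_task : Int) (out : (List (Int × List Int)) × (List (Int × List Int))) : Decidable (Spec_split_tasks images labels classes_per_task out) := by unfold Spec_split_tasks; infer_instance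

-- ===== CLAIM (what is proved, stated in full; the proofs are below) =====
def Claim_equal_split_tasks : Prop := ∀ (images : List Int) (labels : List Int) (classes_per_task : Int), Dom_split_tasks images labels classes_per_task → Pre_split_tasks images labels classes_per_task → Spec_split_tasks images labels classes_per_task (split_tasks images labels classes_per_task)

-- ===== LEMMAS AND PROOFS =====

-- Proof-only abbreviations and helpers (used by the lemmas below, not by the claims).

-- canonical grouping: for each task k in range(n_splits), the selected components of the
-- zipped (image, label) pairs whose label floor-divides to k
def pvCanon (pairs : List (Int × Int)) (cpt s : Int) (sel : Int × Int → Int) : List (Int × List Int) :=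
  (PySem.List.pyRange 0 s 1).map (fun k => (k, (pairs.filter (fun p => decide (PySem.Int.floordiv p.2 cpt = k))).map sel))

-- one outer iteration of A (for task i), acting on one of the two dicts
def pvStepA (pairs : List (Int × Int)) (cpt : Int) (sel : Int × Int → Int) (i : Int) (d : PySem.Dict Int (List Int)) : PySem.Dict Int (List Int) :=
  pairs.foldl (fun d p => if p.2 ∈ (PySem.List.pyRange 0 cpt 1).map (fun x => x + i * cpt) then d.modify i [] (fun v => v ++ [sel p]) else d) d

-- a fold updating a pair componentwise under a guard splits into two independent folds
theorem pv_pair_split {α β γ : Type} (P : γ → Prop) [DecidablePred P] (f : α → γ → α) (g : β → γ → β) (l : List γ) (a : α) (b : β) :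
    l.foldl (fun st x => if P x then (f st.1 x, g st.2 x) else st) (a, b)
      = (l.foldl (fun a x => if P x then f a x else a) a,
         l.foldl (fun b x => if P x then g b x else b) b) := by
  induction l generalizing a b with
  | nil => rfl
  | cons q t ih =>
    simp only [List.foldl_cons]
    by_cases h : P q
    · simp only [if_pos h]; exact ih _ _
    · simp only [if_neg h]; exact ih _ _

-- an index loop over two parallel lists is a loop over their zip
theorem pv_range_fold_two {β : Type} (as bs : List Int) (h : as.length ≤ bs.length) (f : β → Int → Int → β) (init : β) :
    (List.range as.length).foldl (fun acc k => f acc (as.getD k 0) (bs.getD k 0)) init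
      = (as.zip bs).foldl (fun acc p => f acc p.1 p.2) init := by
  induction as generalizing bs init with
  | nil => simp
  | cons a as ih =>
    cases bs with
    | nil => simp at h
    | cons b bs =>
      simp only [List.length_cons, List.range_succ_eq_map, List.foldl_cons, List.foldl_map,
        List.getD_cons_zero, List.getD_cons_succ, List.zip_cons_cons]
      exact ih bs (by simpa using h) (f init a b)

theorem pv_pyrange_fold_two {β : Type} (as bs : List Int) (h : as.length ≤ bs.length) (f : β → Int → Int → β) (init : β) :
    (PySem.List.pyRange 0 (as.length : Int) 1).foldl (fun acc j => f acc (PySem.List.pyGetD as j 0) (PySem.List.pyGetD bs j 0)) init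
      = (as.zip bs).foldl (fun acc p => f acc p.1 p.2) init := by
  rw [PySem.List.pyRange_one, List.foldl_map]
  simp only [zero_add, PySem.List.pyGetD_natCast, Int.sub_zero, Int.toNat_natCast]
  exact pv_range_fold_two as bs h f init

-- value at k of a guarded grouping fold over a dict
theorem pv_getD_guard_fold {γ : Type} (P : γ → Prop) [DecidablePred P] (key pay : γ → Int) (l : List γ) (d : PySem.Dict Int (List Int)) (k : Int) :
    (l.foldl (fun d x => if P x then d.modify (key x) [] (fun v => v ++ [pay x]) else d) d).getD k []
      = d.getD k [] ++ (l.filter (fun x => decide (P x ∧ key x = k))).map pay := by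
  induction l generalizing d with
  | nil => simp
  | cons a t ih =>
    simp only [List.foldl_cons, List.filter_cons]
    by_cases hP : P a
    · rw [if_pos hP, ih, PySem.Dict.getD_modify]
      by_cases hk : key a = k
      · simp [hP, hk]
      · have hk' : k ≠ key a := Ne.symm hk
        simp [hP, hk, hk']
    · simp [hP, ih]

-- value at k of a guarded grouping fold over index buckets (lengths fixed at N, keys in range)
theorem pv_getD_fold_set {γ : Type} (P : γ → Prop) [DecidablePred P] (key pay : γ → Int) (l : List γ) (N : Nat) (hR : ∀ x, P x → 0 ≤ key x ∧ (key x).toNat < N) (bs : List (List Int)) (hlen : bs.length = N) (k : Nat) :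
    (l.foldl (fun bs x => if P x then bs.set (key x).toNat (bs.getD (key x).toNat [] ++ [pay x]) else bs) bs).getD k []
      = bs.getD k [] ++ (l.filter (fun x => decide (P x ∧ key x = (k : Int)))).map pay := by
  induction l generalizing bs with
  | nil => simp
  | cons a t ih =>
    simp only [List.foldl_cons, List.filter_cons]
    by_cases hP : P a
    · rw [if_pos hP, ih _ (by simpa using hlen)]
      obtain ⟨h0, hlt⟩ := hR a hP
      by_cases hk : key a = (k : Int)
      · have hk' : (key a).toNat = k := by omega
        have hklt : k < bs.length := by omega
        simp only [hk', List.getD, List.getElem?_set_self hklt]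
        simp [hP, hk]
      · have hk' : (key a).toNat ≠ k := by omega
        simp only [List.getD, List.getElem?_set_ne hk']
        simp [hP, hk]
    · rw [if_neg hP, ih _ hlen]
      simp [hP]

-- keys of a guarded grouping fold are unchanged when every touched key is present
theorem pv_keys_guard_fold {γ : Type} (P : γ → Prop) [DecidablePred P] (key pay : γ → Int) (l : List γ) (d : PySem.Dict Int (List Int)) (h : ∀ x ∈ l, P x → key x ∈ d.keys) :
    (l.foldl (fun d x => if P x then d.modify (key x) [] (fun v => v ++ [pay x]) else d) d).keys = d.keys := by
  induction l generalizing d with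
  | nil => rfl
  | cons a t ih =>
    simp only [List.foldl_cons]
    by_cases hP : P a
    · rw [if_pos hP]
      have hc : d.contains (key a) = true := (PySem.Dict.contains_iff_mem_keys _ _).mpr (h a (by simp) hP)
      have hk : (d.modify (key a) [] (fun v => v ++ [pay a])).keys = d.keys := by
        rw [PySem.Dict.keys_modify, PySem.Dict.keys_insert_of_contains _ _ hc]
      rw [ih _ (by intro x hx hPx; rw [hk]; exact h x (by simp [hx]) hPx), hk]
    · rw [if_neg hP]; exact ih d (fun x hx => h x (by simp [hx]))

-- the initial dict {t: [] for t in range(s)}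
theorem pv_init_items (s : Int) :
    ((PySem.List.pyRange 0 s 1).foldl (fun d t => d.insert t ([] : List Int)) PySem.Dict.empty).items
      = (PySem.List.pyRange 0 s 1).map (fun t => (t, [])) := by
  have h := PySem.Dict.items_foldl_insert_fresh (PySem.List.pyRange 0 s 1) (fun t => t) (fun _ => ([] : List Int)) PySem.Dict.empty
    (by intro a _; simp) (by simpa using PySem.List.nodup_pyRange_one 0 s)
  simpa using h

theorem pv_init_keys (s : Int) :
    ((PySem.List.pyRange 0 s 1).foldl (fun d t => d.insert t ([] : List Int)) PySem.Dict.empty).keys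
      = PySem.List.pyRange 0 s 1 := by
  rw [PySem.Dict.keys_foldl_insert]
  simp only [PySem.Dict.keys_empty, PySem.Set.update_nil_left]
  exact PySem.Set.ofList_eq_self_of_nodup _ (PySem.List.nodup_pyRange_one 0 s)

theorem pv_init_getD (s k : Int) :
    ((PySem.List.pyRange 0 s 1).foldl (fun d t => d.insert t ([] : List Int)) PySem.Dict.empty).getD k [] = [] := by
  by_cases hc : ((PySem.List.pyRange 0 s 1).foldl (fun d t => d.insert t ([] : List Int)) PySem.Dict.empty).contains k = true
  · have hk : k ∈ ((PySem.List.pyRange 0 s 1).foldl (fun d t => d.insert t ([] : List Int)) PySem.Dict.empty).keys :=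
      (PySem.Dict.contains_iff_mem_keys _ _).mp hc
    rw [pv_init_keys] at hk
    refine PySem.Dict.getD_of_mem_items _ ?_ (by rw [pv_init_keys]; exact PySem.List.nodup_pyRange_one 0 s) []
    rw [pv_init_items]; exact List.mem_map.mpr ⟨k, hk, rfl⟩
  · exact PySem.Dict.getD_of_not_contains _ _ (by simpa using hc)

theorem pv_stepA_getD (pairs : List (Int × Int)) (cpt : Int) (sel : Int × Int → Int) (i : Int) (d : PySem.Dict Int (List Int)) (k : Int) :
    (pvStepA pairs cpt sel i d).getD k []
      = d.getD k [] ++ (if i = k then (pairs.filter (fun p => decide (p.2 ∈ (PySem.List.pyRange 0 cpt 1).map (fun x => x + i * cpt)))).map sel else []) := by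
  rw [pvStepA, pv_getD_guard_fold]
  by_cases h : i = k
  · subst h; simp
  · simp [h]

theorem pv_stepA_keys (pairs : List (Int × Int)) (cpt : Int) (sel : Int × Int → Int) (i : Int) (d : PySem.Dict Int (List Int)) (hi : i ∈ d.keys) :
    (pvStepA pairs cpt sel i d).keys = d.keys := by
  rw [pvStepA]; exact pv_keys_guard_fold _ _ _ _ _ (fun _ _ _ => hi)

theorem pv_A_outer_prod (pairs : List (Int × Int)) (cpt : Int) (L : List Int) (a b : PySem.Dict Int (List Int)) :
    L.foldl (fun st i => (pvStepA pairs cpt (fun p => p.1) i st.1, pvStepA pairs cpt (fun p => p.2) i st.2)) (a, b)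
      = (L.foldl (fun d i => pvStepA pairs cpt (fun p => p.1) i d) a, L.foldl (fun d i => pvStepA pairs cpt (fun p => p.2) i d) b) := by
  induction L generalizing a b with
  | nil => rfl
  | cons x t ih => simp only [List.foldl_cons]; exact ih _ _

theorem pv_A_outer_keys (pairs : List (Int × Int)) (cpt : Int) (sel : Int × Int → Int) (L : List Int) (d : PySem.Dict Int (List Int)) (h : ∀ i ∈ L, i ∈ d.keys) :
    (L.foldl (fun d i => pvStepA pairs cpt sel i d) d).keys = d.keys := by
  induction L generalizing d with
  | nil => rfl
  | cons a t ih =>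
    simp only [List.foldl_cons]
    have hk := pv_stepA_keys pairs cpt sel a d (h a (by simp))
    rw [ih _ (by intro i hi; rw [hk]; exact h i (by simp [hi])), hk]

theorem pv_A_outer_getD (pairs : List (Int × Int)) (cpt : Int) (sel : Int × Int → Int) (L : List Int) (hnd : L.Nodup) (d : PySem.Dict Int (List Int)) (k : Int) :
    (L.foldl (fun d i => pvStepA pairs cpt sel i d) d).getD k []
      = d.getD k [] ++ (if k ∈ L then (pairs.filter (fun p => decide (p.2 ∈ (PySem.List.pyRange 0 cpt 1).map (fun x => x + k * cpt)))).map sel else []) := by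
  induction L generalizing d with
  | nil => simp
  | cons a t ih =>
    simp only [List.foldl_cons]
    rw [ih (List.nodup_cons.mp hnd).2, pv_stepA_getD]
    by_cases hk : a = k
    · subst hk
      have : a ∉ t := (List.nodup_cons.mp hnd).1
      simp [this]
    · have hk' : k ≠ a := Ne.symm hk
      simp [hk, hk']

-- label ∈ [i*cpt, (i+1)*cpt)  ↔  label // cpt = i   (for positive cpt)
theorem pv_mem_block (cpt : Int) (hc : 0 < cpt) (i x : Int) :
    (x ∈ (PySem.List.pyRange 0 cpt 1).map (fun y => y + i * cpt)) ↔ PySem.Int.floordiv x cpt = i := by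
  rw [PySem.Int.floordiv_eq_iff_of_pos hc]
  simp only [List.mem_map, PySem.List.mem_pyRange_one]
  have hmul : (i + 1) * cpt = i * cpt + cpt := by ring
  constructor
  · rintro ⟨y, ⟨h0, h1⟩, rfl⟩
    exact ⟨by linarith, by rw [hmul]; linarith⟩
  · rintro ⟨h0, h1⟩
    exact ⟨x - i * cpt, ⟨by linarith, by rw [hmul] at h1; linarith⟩, by ring⟩

-- a dict with keys range(s) and known values has canonical items
theorem pv_items_canon (d : PySem.Dict Int (List Int)) (s : Int) (F : Int → List Int)
    (hkeys : d.keys = PySem.List.pyRange 0 s 1)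
    (hget : ∀ k ∈ PySem.List.pyRange 0 s 1, d.getD k [] = F k) :
    d.items = (PySem.List.pyRange 0 s 1).map (fun k => (k, F k)) := by
  rw [PySem.Dict.items_eq_map_keys d (by rw [hkeys]; exact PySem.List.nodup_pyRange_one 0 s) [], hkeys]
  exact List.map_congr_left (fun k hk => by rw [hget k hk])

theorem pv_cpt_pos (N cpt : Int) (hN : 0 ≤ N) (hne : cpt ≠ 0) (h : 0 < PySem.Int.floordiv N cpt) : 0 < cpt := by
  rcases lt_trichotomy cpt 0 with hlt | h0 | hgt
  · exfalso
    have hdm := PySem.Int.floordiv_mul_add_mod N cpt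
    have hb := PySem.Int.mod_neg_bounds N hlt
    nlinarith
  · exact absurd h0 hne
  · exact hgt

-- B's result is the canonical grouping (for every classes_per_task)
theorem pv_B_eq_canon (images labels : List Int) (cpt : Int) :
    split_tasks_alt images labels cpt
      = (pvCanon (images.zip labels) cpt (PySem.Int.floordiv ((PySem.Set.ofList labels).length : Int) cpt) (fun p => p.1),
         pvCanon (images.zip labels) cpt (PySem.Int.floordiv ((PySem.Set.ofList labels).length : Int) cpt) (fun p => p.2)) := by
  simp only [split_tasks_alt]
  set s : Int := PySem.Int.floordiv ((PySem.Set.ofList labels).length : Int) cpt with hs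
  have hsplit : (images.zip labels).foldl (fun st p =>
        if 0 ≤ PySem.Int.floordiv p.2 cpt ∧ PySem.Int.floordiv p.2 cpt < s then
          (st.1.set (PySem.Int.floordiv p.2 cpt).toNat (st.1.getD (PySem.Int.floordiv p.2 cpt).toNat [] ++ [p.1]),
           st.2.set (PySem.Int.floordiv p.2 cpt).toNat (st.2.getD (PySem.Int.floordiv p.2 cpt).toNat [] ++ [p.2]))
        else st) (List.replicate s.toNat [], List.replicate s.toNat [])
      = ((images.zip labels).foldl (fun bs p =>
            if 0 ≤ PySem.Int.floordiv p.2 cpt ∧ PySem.Int.floordiv p.2 cpt < s then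
              bs.set (PySem.Int.floordiv p.2 cpt).toNat (bs.getD (PySem.Int.floordiv p.2 cpt).toNat [] ++ [p.1])
            else bs) (List.replicate s.toNat []),
         (images.zip labels).foldl (fun bs p =>
            if 0 ≤ PySem.Int.floordiv p.2 cpt ∧ PySem.Int.floordiv p.2 cpt < s then
              bs.set (PySem.Int.floordiv p.2 cpt).toNat (bs.getD (PySem.Int.floordiv p.2 cpt).toNat [] ++ [p.2])
            else bs) (List.replicate s.toNat [])) :=
    pv_pair_split (fun p : Int × Int => 0 ≤ PySem.Int.floordiv p.2 cpt ∧ PySem.Int.floordiv p.2 cpt < s)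
      (fun bs p => bs.set (PySem.Int.floordiv p.2 cpt).toNat (bs.getD (PySem.Int.floordiv p.2 cpt).toNat [] ++ [p.1]))
      (fun bs p => bs.set (PySem.Int.floordiv p.2 cpt).toNat (bs.getD (PySem.Int.floordiv p.2 cpt).toNat [] ++ [p.2]))
      (images.zip labels) (List.replicate s.toNat []) (List.replicate s.toNat [])
  rw [hsplit]
  have hR : ∀ p : Int × Int, (0 ≤ PySem.Int.floordiv p.2 cpt ∧ PySem.Int.floordiv p.2 cpt < s) →
      0 ≤ PySem.Int.floordiv p.2 cpt ∧ (PySem.Int.floordiv p.2 cpt).toNat < s.toNat := by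
    intro p hp; omega
  have hrep : ∀ k : Nat, (List.replicate s.toNat ([] : List Int)).getD k [] = [] := by
    intro k
    rcases Nat.lt_or_ge k s.toNat with h | h
    · simp [List.getD, h]
    · simp [List.getD, Nat.not_lt.mpr h]
  unfold pvCanon
  dsimp only
  rw [Prod.mk.injEq]
  constructor
  · refine List.map_congr_left ?_
    intro k hk
    have hk' := PySem.List.mem_pyRange_one.mp hk
    have hbk := pv_getD_fold_set
      (fun p : Int × Int => 0 ≤ PySem.Int.floordiv p.2 cpt ∧ PySem.Int.floordiv p.2 cpt < s)
      (fun p => PySem.Int.floordiv p.2 cpt) (fun p => p.1) (images.zip labels) s.toNat hR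
      (List.replicate s.toNat []) (by simp) k.toNat
    rw [hbk, hrep, List.nil_append, Int.toNat_of_nonneg hk'.1]
    refine congrArg (fun l => (k, l)) (congrArg (List.map _) (List.filter_congr ?_))
    intro p _
    simp only [decide_eq_decide]
    omega
  · refine List.map_congr_left ?_
    intro k hk
    have hk' := PySem.List.mem_pyRange_one.mp hk
    have hbk := pv_getD_fold_set
      (fun p : Int × Int => 0 ≤ PySem.Int.floordiv p.2 cpt ∧ PySem.Int.floordiv p.2 cpt < s)
      (fun p => PySem.Int.floordiv p.2 cpt) (fun p => p.2) (images.zip labels) s.toNat hR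
      (List.replicate s.toNat []) (by simp) k.toNat
    rw [hbk, hrep, List.nil_append, Int.toNat_of_nonneg hk'.1]
    refine congrArg (fun l => (k, l)) (congrArg (List.map _) (List.filter_congr ?_))
    intro p _
    simp only [decide_eq_decide]
    omega

-- A's result is the canonical grouping (positive classes_per_task, labels long enough)
theorem pv_A_eq_canon (images labels : List Int) (cpt : Int) (hc : 0 < cpt) (hlen : images.length ≤ labels.length) :
    split_tasks images labels cpt
      = (pvCanon (images.zip labels) cpt (PySem.Int.floordiv ((PySem.Set.ofList labels).length : Int) cpt) (fun p => p.1),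
         pvCanon (images.zip labels) cpt (PySem.Int.floordiv ((PySem.Set.ofList labels).length : Int) cpt) (fun p => p.2)) := by
  simp only [split_tasks]
  have hbody : (fun (st : PySem.Dict Int (List Int) × PySem.Dict Int (List Int)) (i : Int) =>
        (PySem.List.pyRange 0 (images.length : Int) 1).foldl (fun st j =>
          if (PySem.List.pyGetD labels j 0) ∈ (PySem.List.pyRange 0 cpt 1).map (fun x => x + i * cpt) then
            (st.1.modify i [] (fun v => v ++ [PySem.List.pyGetD images j 0]),
             st.2.modify i [] (fun v => v ++ [PySem.List.pyGetD labels j 0]))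
          else st) st)
      = (fun st i => (pvStepA (images.zip labels) cpt (fun p => p.1) i st.1,
                      pvStepA (images.zip labels) cpt (fun p => p.2) i st.2)) := by
    funext st i
    obtain ⟨d1, d2⟩ := st
    exact (pv_pyrange_fold_two images labels hlen
        (fun acc a b => if b ∈ (PySem.List.pyRange 0 cpt 1).map (fun x => x + i * cpt) then
          (acc.1.modify i [] (fun v => v ++ [a]), acc.2.modify i [] (fun v => v ++ [b])) else acc) (d1, d2)).trans
      (pv_pair_split (fun p : Int × Int => p.2 ∈ (PySem.List.pyRange 0 cpt 1).map (fun x => x + i * cpt))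
        (fun d p => d.modify i [] (fun v => v ++ [p.1])) (fun d p => d.modify i [] (fun v => v ++ [p.2])) (images.zip labels) d1 d2)
  rw [hbody, pv_A_outer_prod]
  unfold pvCanon
  dsimp only
  rw [Prod.mk.injEq]
  constructor
  · refine pv_items_canon _ _ _ ?_ ?_
    · rw [pv_A_outer_keys _ _ _ _ _ (by intro i hi; rw [pv_init_keys]; exact hi)]
      exact pv_init_keys _
    · intro k hk
      rw [pv_A_outer_getD _ _ _ _ (PySem.List.nodup_pyRange_one 0 _) _ _, pv_init_getD, List.nil_append, if_pos hk]
      refine congrArg (List.map _) (List.filter_congr ?_)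
      intro p _
      simp only [decide_eq_decide]
      exact pv_mem_block cpt hc k p.2
  · refine pv_items_canon _ _ _ ?_ ?_
    · rw [pv_A_outer_keys _ _ _ _ _ (by intro i hi; rw [pv_init_keys]; exact hi)]
      exact pv_init_keys _
    · intro k hk
      rw [pv_A_outer_getD _ _ _ _ (PySem.List.nodup_pyRange_one 0 _) _ _, pv_init_getD, List.nil_append, if_pos hk]
      refine congrArg (List.map _) (List.filter_congr ?_)
      intro p _
      simp only [decide_eq_decide]
      exact pv_mem_block cpt hc k p.2

-- ===== VERDICT (by name: the statement is the Claim_ definition above) =====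
theorem split_tasks_spec : Claim_equal_split_tasks := by
  intro images labels cpt hDom hPre
  obtain ⟨hne, hlen⟩ := hPre
  unfold Spec_split_tasks
  by_cases hs : PySem.Int.floordiv ((PySem.Set.ofList labels).length : Int) cpt ≤ 0
  · have hnil : PySem.List.pyRange 0 (PySem.Int.floordiv ((PySem.Set.ofList labels).length : Int) cpt) 1 = [] :=
      PySem.List.pyRange_one_eq_nil (by omega)
    rw [pv_B_eq_canon]
    simp [split_tasks, pvCanon, hnil]
    rfl
  · have hs' : 0 < PySem.Int.floordiv ((PySem.Set.ofList labels).length : Int) cpt := by omega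
    have hc : 0 < cpt := pv_cpt_pos _ _ (by positivity) hne hs'
    have hlen' : images.length ≤ labels.length := by
      rcases hlen with h | h
      · exact h
      · exact absurd h (by omega)
    rw [pv_A_eq_canon images labels cpt hc hlen', pv_B_eq_canon]
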